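-- pv_equiv track=rewrite | github.com/skjall/medication-tracker | app/barcode_validator.py | validate_de_pzn
-- ===== SOURCE A (Python) =====
-- def validate_de_pzn(pzn: str) -> bool:
--     """
--     Validate German PZN with Modulo-11 check digit.
--     PZN8: 8 digits total (7 digits + 1 check digit)
--
--     Calculation:
--     - 1st digit × 1
--     - 2nd digit × 2
--     - 3rd digit × 3
--     - 4th digit × 4
--     - 5th digit × 5
--     - 6th digit × 6
--     - 7th digit × 7
--     - Sum modulo 11 = check digit (8th digit)
--     """
--     if not pzn or not pzn.isdigit():
--         return False
--
--     if len(pzn) == 8: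
--         # PZN8: Calculate check digit for first 7 digits
--         total = 0
--         for i in range(7):
--             # Position starts at 1, not 0
--             total += int(pzn[i]) * (i + 1)
--
--         check = total % 11
--
--         # If remainder is 10, this PZN is invalid (would need 2 digits)
--         if check == 10:
--             return False
--
--         expected_check = int(pzn[7])
--         return check == expected_check
--
--     # Old PZN7 format (deprecated but might still exist)
--     elif len(pzn) == 7:
--         # PZN7: 6 digits + 1 check digit
--         total = 0
--         for i in range(6):
--             total += int(pzn[i]) * (i + 2)  # Weights 2-7 for positions 1-6
--
--         check = total % 11
--         if check == 10:
--             return False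
--
--         expected_check = int(pzn[6])
--         return check == expected_check
--
--     return False
-- ===== SOURCE B (Python) =====
-- # Different algorithm: divisibility test. A PZN is valid iff the dot product of
-- # its digits with a fixed weight vector (check digit weighted 10 == -1 mod 11)
-- # is divisible by 11. The check==10 rejection of A is subsumed: a remainder of
-- # 10 can never equal a single decimal check digit.
-- _WEIGHTS = {7: (2, 3, 4, 5, 6, 7, 10), 8: (1, 2, 3, 4, 5, 6, 7, 10)}
--
-- def validate_de_pzn(pzn: str) -> bool:
--     if not pzn.isdigit():  # empty string is not .isdigit() either
--         return False
--     w = _WEIGHTS.get(len(pzn))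
--     if w is None:
--         return False
--     return sum(d * k for d, k in zip(map(int, pzn), w)) % 11 == 0
-- ===== Notes on version B (the rewrite author's own statement) =====
-- stated objective: alternative
-- what changed: Replaces A's per-length loops that compare the mod-11 remainder to the check digit (with an explicit remainder-10 rejection) by a table-driven divisibility test: the digits are zipped with a per-length weight tuple (check digit weighted 10, i.e. -1 mod 11) and the PZN is valid iff the dot product is divisible by 11.
import Mathlib
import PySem

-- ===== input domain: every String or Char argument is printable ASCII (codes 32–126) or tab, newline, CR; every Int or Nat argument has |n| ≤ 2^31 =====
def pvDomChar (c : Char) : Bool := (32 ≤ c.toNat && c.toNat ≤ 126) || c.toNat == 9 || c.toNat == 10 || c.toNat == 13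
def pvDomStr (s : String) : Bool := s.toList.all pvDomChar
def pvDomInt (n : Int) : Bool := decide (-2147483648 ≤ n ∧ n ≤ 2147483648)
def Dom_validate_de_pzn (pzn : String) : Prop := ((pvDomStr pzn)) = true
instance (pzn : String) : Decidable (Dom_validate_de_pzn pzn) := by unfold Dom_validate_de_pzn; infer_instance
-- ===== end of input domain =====

-- B replaces A's compare-remainder-to-check-digit loops by a single divisibility test:
-- the dot product of the digits with a weight table (check digit weighted 10) must be divisible by 11 (objective: alternative).

-- int(c) for a single digit character; exact because both ports call it only under the isdigit guard (ASCII domain)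
def pvDigit (c : Char) : Int := (c.toNat : Int) - 48

-- ===== PORT A =====
def validate_de_pzn (pzn : String) : Bool :=
  if pzn.toList.isEmpty || !(PySem.Chars.strIsdigit pzn.toList) then false
  else if pzn.toList.length = 8 then
    -- total = 0; for i in range(7): total += int(pzn[i]) * (i + 1)
    let total := (PySem.List.pyRange 0 7 1).foldl
      (fun t i => t + pvDigit (PySem.List.pyGetD pzn.toList i ' ') * (i + 1)) 0
    let check := PySem.Int.mod total 11
    if check = 10 then false
    else decide (check = pvDigit (PySem.List.pyGetD pzn.toList 7 ' '))
  else if pzn.toList.length = 7 then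
    -- total = 0; for i in range(6): total += int(pzn[i]) * (i + 2)
    let total := (PySem.List.pyRange 0 6 1).foldl
      (fun t i => t + pvDigit (PySem.List.pyGetD pzn.toList i ' ') * (i + 2)) 0
    let check := PySem.Int.mod total 11
    if check = 10 then false
    else decide (check = pvDigit (PySem.List.pyGetD pzn.toList 6 ' '))
  else false

-- ===== PORT B =====
-- _WEIGHTS = {7: (2,3,4,5,6,7,10), 8: (1,2,3,4,5,6,7,10)}
def pvWeightsB : PySem.Dict Int (List Int) :=
  ((PySem.Dict.empty).insert 7 [2, 3, 4, 5, 6, 7, 10]).insert 8 [1, 2, 3, 4, 5, 6, 7, 10]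

def validate_de_pzn_alt (pzn : String) : Bool :=
  if !(PySem.Chars.strIsdigit pzn.toList) then false
  else
    match pvWeightsB.get? (pzn.toList.length : Int) with
    | none => false
    | some w =>
      -- sum(d * k for d, k in zip(map(int, pzn), w)) % 11 == 0
      decide (PySem.Int.mod (((pzn.toList.map pvDigit).zip w).map (fun p => p.1 * p.2)).sum 11 = 0)

-- ===== PRECONDITION & SPEC =====
def Spec_validate_de_pzn (pzn : String) (out : Bool) : Prop := out = validate_de_pzn_alt pzn
instance (pzn : String) (out : Bool) : Decidable (Spec_validate_de_pzn pzn out) := by unfold Spec_validate_de_pzn; infer_instance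

-- ===== CLAIM (what is proved, stated in full; the proofs are below) =====
def Claim_equal_validate_de_pzn : Prop := ∀ (pzn : String), Dom_validate_de_pzn pzn → Spec_validate_de_pzn pzn (validate_de_pzn pzn)

-- ===== LEMMAS AND PROOFS =====

theorem pvDigit_bounds {c : Char} (h : PySem.Chars.isdigit c = true) :
    0 ≤ pvDigit c ∧ pvDigit c ≤ 9 := by
  simp [PySem.Chars.isdigit, Char.le_def] at h
  obtain ⟨h1, h2⟩ := h
  have h1' : 48 ≤ c.toNat := h1
  have h2' : c.toNat ≤ 57 := h2
  unfold pvDigit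
  omega

-- 'remainder equals the check digit (and is not 10)' IS 'weighted total with the check digit at weight 10 divisible by 11'
theorem pvKey (t d : Int) (h0 : 0 ≤ d) (h9 : d ≤ 9) :
    (!decide (t % 11 = 10) && decide (t % 11 = d)) = decide ((11 : Int) ∣ t + d * 10) := by
  rw [Bool.eq_iff_iff]
  simp only [Bool.and_eq_true, Bool.not_eq_true', decide_eq_true_eq, decide_eq_false_iff_not]
  omega

theorem pyRange7 : PySem.List.pyRange 0 7 1 = [0, 1, 2, 3, 4, 5, 6] := by decide
theorem pyRange6 : PySem.List.pyRange 0 6 1 = [0, 1, 2, 3, 4, 5] := by decide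

-- ===== VERDICT (by name: the statement is the Claim_ definition above) =====
theorem validate_de_pzn_spec : Claim_equal_validate_de_pzn := by
  intro pzn _
  unfold Spec_validate_de_pzn validate_de_pzn validate_de_pzn_alt
  by_cases hd : PySem.Chars.strIsdigit pzn.toList = true
  · have hne : pzn.toList.isEmpty = false := by
      rcases h : pzn.toList.isEmpty with _ | _
      · rfl
      · simp [PySem.Chars.strIsdigit, h] at hd
    have hall : pzn.toList.all PySem.Chars.isdigit = true := by
      unfold PySem.Chars.strIsdigit at hd
      simp only [Bool.and_eq_true] at hd
      exact hd.2
    rw [hne, hd]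
    simp only [Bool.not_true, Bool.or_self, Bool.false_eq_true, if_false]
    rcases hcs : pzn.toList with _ | ⟨a, _ | ⟨b, _ | ⟨c, _ | ⟨d, _ | ⟨e, _ | ⟨f, _ | ⟨g, _ | ⟨h, _ | ⟨i, t⟩⟩⟩⟩⟩⟩⟩⟩⟩ <;>
      rw [hcs] at hall <;>
      (try simp only [List.all_cons, Bool.and_eq_true] at hall) <;>
      simp [pyRange7, pyRange6, PySem.List.pyGetD, pvWeightsB, PySem.Dict.get?,
            PySem.Dict.insert, PySem.Dict.empty, List.zip, List.zipWith]
    · -- length 7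
      obtain ⟨hg0, hg9⟩ := pvDigit_bounds hall.2.2.2.2.2.2.1
      rw [show pvDigit a * 2 + (pvDigit b * 3 + (pvDigit c * 4 + (pvDigit d * 5
            + (pvDigit e * 6 + (pvDigit f * 7 + pvDigit g * 10)))))
          = (pvDigit a * 2 + pvDigit b * 3 + pvDigit c * 4 + pvDigit d * 5 + pvDigit e * 6
             + pvDigit f * 7) + pvDigit g * 10
          by ring]
      exact pvKey _ _ hg0 hg9
    · -- length 8
      obtain ⟨hh0, hh9⟩ := pvDigit_bounds hall.2.2.2.2.2.2.2.1
      rw [show pvDigit a + (pvDigit b * 2 + (pvDigit c * 3 + (pvDigit d * 4 + (pvDigit e * 5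
            + (pvDigit f * 6 + (pvDigit g * 7 + pvDigit h * 10))))))
          = (pvDigit a + pvDigit b * 2 + pvDigit c * 3 + pvDigit d * 4 + pvDigit e * 5
             + pvDigit f * 6 + pvDigit g * 7) + pvDigit h * 10
          by ring]
      exact pvKey _ _ hh0 hh9
    · -- length ≥ 9: both sides false; the dict lookup misses
      have h7 : ((7 : Int) == ((t.length : Int) + 1 + 1 + 1 + 1 + 1 + 1 + 1 + 1 + 1)) = false := by
        simp only [beq_eq_false_iff_ne, ne_eq]
        omega
      have h8 : ((8 : Int) == ((t.length : Int) + 1 + 1 + 1 + 1 + 1 + 1 + 1 + 1 + 1)) = false := by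
        simp only [beq_eq_false_iff_ne, ne_eq]
        omega
      simp [List.find?, h7, h8]
  · have hd' : PySem.Chars.strIsdigit pzn.toList = false := by
      simpa using hd
    simp [hd']
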